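-- pv_equiv track=rewrite | github.com/jonemos/LottoGenerator | LottoGenerator/app.py | validate_color_constraint
-- ===== SOURCE A (Python) =====
-- def validate_color_constraint(numbers):
--     color_ranges = {
--         "yellow": range(1, 11),
--         "blue": range(11, 21),
--         "red": range(21, 31),
--         "gray": range(31, 41),
--         "green": range(41, 46)
--     }
--     colors = set()
--     for number in numbers:
--         for color, range_values in color_ranges.items():
--             if number in range_values:
--                 colors.add(color)
--                 break
--     return 3 <= len(colors) <= 4
-- ===== SOURCE B (Python) =====
-- def validate_color_constraint(numbers):
--     colors = {(number - 1) // 10 for number in numbers if number in range(1, 46)}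
--     return 3 <= len(colors) <= 4
-- ===== Notes on version B (the rewrite author's own statement) =====
-- stated objective: simpler
-- what changed: Replaces the color-name dict and the inner scan over five ranges with the closed-form group index (number - 1) // 10 collected into a set comprehension.
import Mathlib
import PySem

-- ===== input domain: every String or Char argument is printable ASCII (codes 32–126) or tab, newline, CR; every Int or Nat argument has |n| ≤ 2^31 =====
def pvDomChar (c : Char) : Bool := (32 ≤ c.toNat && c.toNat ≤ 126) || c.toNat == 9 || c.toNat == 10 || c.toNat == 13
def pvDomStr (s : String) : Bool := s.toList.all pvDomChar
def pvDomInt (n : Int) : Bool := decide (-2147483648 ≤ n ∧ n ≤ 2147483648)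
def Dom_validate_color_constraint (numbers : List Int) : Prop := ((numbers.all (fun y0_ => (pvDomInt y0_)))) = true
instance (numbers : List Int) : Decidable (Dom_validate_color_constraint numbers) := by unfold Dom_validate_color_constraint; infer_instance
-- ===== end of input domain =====

-- B replaces A's color-name table and inner 5-range scan by the closed-form group index (n-1)//10 collected into a set (simpler).

-- ===== PORT A =====
-- color_ranges: insertion-ordered dict of name ↦ range(lo, hi); 'number in range(lo, hi)' for an int is lo ≤ number < hi
def pvColorRanges : List (String × Int × Int) :=
  [("yellow", 1, 11), ("blue", 11, 21), ("red", 21, 31), ("gray", 31, 41), ("green", 41, 46)]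

-- inner 'for color, range_values … break' = first matching dict entry; colors is a Python set of color names
def validate_color_constraint (numbers : List Int) : Bool :=
  let colors : PySem.Set String := numbers.foldl (fun colors number =>
    match pvColorRanges.find? (fun p => decide (p.2.1 ≤ number ∧ number < p.2.2)) with
    | some p => PySem.Set.add colors p.1
    | none => colors) PySem.Set.empty
  decide (3 ≤ PySem.Set.len colors ∧ PySem.Set.len colors ≤ 4)

-- ===== PORT B =====
def validate_color_constraint_alt (numbers : List Int) : Bool :=
  let colors : PySem.Set Int := numbers.foldl (fun colors number =>
    if 1 ≤ number ∧ number < 46 then PySem.Set.add colors (PySem.Int.floordiv (number - 1) 10) else colors)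
    PySem.Set.empty
  decide (3 ≤ PySem.Set.len colors ∧ PySem.Set.len colors ≤ 4)

-- ===== PRECONDITION & SPEC =====
def Spec_validate_color_constraint (numbers : List Int) (out : Bool) : Prop := out = validate_color_constraint_alt numbers
instance (numbers : List Int) (out : Bool) : Decidable (Spec_validate_color_constraint numbers out) := by unfold Spec_validate_color_constraint; infer_instance

-- ===== CLAIM (what is proved, stated in full; the proofs are below) =====
def Claim_equal_validate_color_constraint : Prop := ∀ (numbers : List Int), Dom_validate_color_constraint numbers → Spec_validate_color_constraint numbers (validate_color_constraint numbers)

-- ===== LEMMAS AND PROOFS =====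

-- the color name A stores for the group index g = (n-1)//10 (g = 0..4)
def pvF (g : Int) : String :=
  if g = 0 then "yellow" else if g = 1 then "blue" else if g = 2 then "red"
  else if g = 3 then "gray" else "green"

theorem pvF_mem_map (cB : List Int) (hb : ∀ x ∈ cB, 0 ≤ x ∧ x < 5)
    (g : Int) (hg0 : 0 ≤ g) (hg5 : g < 5) : pvF g ∈ cB.map pvF ↔ g ∈ cB := by
  constructor
  · intro h
    obtain ⟨x, hx, hfx⟩ := List.mem_map.1 h
    obtain ⟨h0, h5⟩ := hb x hx
    interval_cases x <;> interval_cases g <;> simp_all [pvF]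
  · exact fun h => List.mem_map_of_mem h

theorem pvAdd_map (cB : List Int) (hb : ∀ x ∈ cB, 0 ≤ x ∧ x < 5)
    (g : Int) (hg0 : 0 ≤ g) (hg5 : g < 5) :
    PySem.Set.add (cB.map pvF) (pvF g) = (PySem.Set.add cB g).map pvF := by
  simp only [PySem.Set.add, PySem.Set.contains, List.contains_iff_mem]
  by_cases h : g ∈ cB
  · simp [h, (pvF_mem_map cB hb g hg0 hg5).2 h]
  · have hnc : pvF g ∉ cB.map pvF := fun hc => h ((pvF_mem_map cB hb g hg0 hg5).1 hc)
    simp [h, hnc]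

-- A's inner scan finds exactly the entry of group (n-1)//10 when n is a valid lotto number
theorem pvFind_valid (n : Int) (hv : 1 ≤ n ∧ n < 46) :
    pvColorRanges.find? (fun p => decide (p.2.1 ≤ n ∧ n < p.2.2))
      = some (pvF ((n - 1) / 10), 1 + 10 * ((n - 1) / 10),
              if (n - 1) / 10 = 4 then 46 else 11 + 10 * ((n - 1) / 10)) := by
  have h5 : (n - 1) / 10 = 0 ∨ (n - 1) / 10 = 1 ∨ (n - 1) / 10 = 2 ∨ (n - 1) / 10 = 3 ∨ (n - 1) / 10 = 4 := by omega
  rcases h5 with h | h | h | h | h <;> rw [h]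
  · simp [pvColorRanges, pvF, show (1 : Int) ≤ n by omega, show n < 11 by omega]
  · simp [pvColorRanges, pvF, show ¬n < 11 by omega, show (11 : Int) ≤ n by omega,
      show n < 21 by omega]
  · simp [pvColorRanges, pvF, show ¬n < 11 by omega, show ¬n < 21 by omega,
      show (21 : Int) ≤ n by omega, show n < 31 by omega]
  · simp [pvColorRanges, pvF, show ¬n < 11 by omega, show ¬n < 21 by omega,
      show ¬n < 31 by omega, show (31 : Int) ≤ n by omega, show n < 41 by omega]
  · simp [pvColorRanges, pvF, show ¬n < 11 by omega, show ¬n < 21 by omega,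
      show ¬n < 31 by omega, show ¬n < 41 by omega, show (41 : Int) ≤ n by omega,
      show n < 46 by omega]

theorem pvFind_invalid (n : Int) (hv : ¬(1 ≤ n ∧ n < 46)) :
    pvColorRanges.find? (fun p => decide (p.2.1 ≤ n ∧ n < p.2.2)) = none := by
  rcases (by omega : n < 1 ∨ 46 ≤ n) with h | h
  · simp [pvColorRanges, show ¬(1 : Int) ≤ n by omega, show ¬(11 : Int) ≤ n by omega,
      show ¬(21 : Int) ≤ n by omega, show ¬(31 : Int) ≤ n by omega, show ¬(41 : Int) ≤ n by omega]
  · simp [pvColorRanges, show ¬n < 11 by omega, show ¬n < 21 by omega,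
      show ¬n < 31 by omega, show ¬n < 41 by omega, show ¬n < 46 by omega]

-- A's set of color names is pointwise pvF of B's set of group indices
theorem pvFold_map (ns : List Int) (cB : List Int) (hb : ∀ x ∈ cB, 0 ≤ x ∧ x < 5) :
    ns.foldl (fun colors number =>
      match pvColorRanges.find? (fun p => decide (p.2.1 ≤ number ∧ number < p.2.2)) with
      | some p => PySem.Set.add colors p.1
      | none => colors) (cB.map pvF)
    = (ns.foldl (fun colors number =>
        if 1 ≤ number ∧ number < 46 then PySem.Set.add colors (PySem.Int.floordiv (number - 1) 10) else colors)
        cB).map pvF := by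
  induction ns generalizing cB with
  | nil => rfl
  | cons n ns ih =>
    simp only [List.foldl_cons]
    by_cases hv : 1 ≤ n ∧ n < 46
    · have hg : PySem.Int.floordiv (n - 1) 10 = (n - 1) / 10 :=
        PySem.Int.floordiv_eq_ediv_of_pos (by omega)
      have hg0 : 0 ≤ (n - 1) / 10 := by omega
      have hg5 : (n - 1) / 10 < 5 := by omega
      have hb' : ∀ x ∈ PySem.Set.add cB ((n - 1) / 10), 0 ≤ x ∧ x < 5 := by
        intro x hx
        rcases (PySem.Set.mem_add cB _ x).1 hx with h | h
        · exact hb x h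
        · subst h; exact ⟨hg0, hg5⟩
      simp only [pvFind_valid n hv, if_pos hv, hg]
      rw [pvAdd_map cB hb _ hg0 hg5]
      exact ih _ hb'
    · rw [pvFind_invalid n hv, if_neg hv]
      exact ih cB hb

-- ===== VERDICT (by name: the statement is the Claim_ definition above) =====
theorem validate_color_constraint_spec : Claim_equal_validate_color_constraint := by
  intro numbers _
  unfold Spec_validate_color_constraint validate_color_constraint validate_color_constraint_alt
  have h := pvFold_map numbers [] (by simp)
  simp only [List.map_nil] at h
  rw [decide_eq_decide]
  have hlen : PySem.Set.len (numbers.foldl (fun colors number =>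
      match pvColorRanges.find? (fun p => decide (p.2.1 ≤ number ∧ number < p.2.2)) with
      | some p => PySem.Set.add colors p.1
      | none => colors) PySem.Set.empty)
    = PySem.Set.len (numbers.foldl (fun colors number =>
        if 1 ≤ number ∧ number < 46 then PySem.Set.add colors (PySem.Int.floordiv (number - 1) 10) else colors)
        PySem.Set.empty) := by
    show PySem.Set.len (numbers.foldl _ ([] : List String)) = PySem.Set.len (numbers.foldl _ ([] : List Int))
    rw [h]
    simp [PySem.Set.len]
  rw [hlen]
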